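-- pv_equiv track=rewrite | github.com/kiung22/algorithm-problem-solving | BaekJoon/9527.py | f
-- ===== SOURCE A (Python) =====
-- def f(x):
--     count = 0
--     k = 0
--
--     while 2 ** k <= x:
--         p_length = 2 ** (k+1)
--         p_count = (x+1) // p_length
--         count += p_count * p_length // 2
--
--         rest = (x+1) % p_length
--         count += max(0, rest - p_length//2)
--
--         k += 1
--
--     return count
-- ===== SOURCE B (Python) =====
-- def f(x):
--     total = 0
--     m = x + 1  # count set bits over 0..m-1
--     while m > 1:
--         k = m.bit_length() - 1
--         p = 1 << k
--         total += k * (p >> 1) + (m - p)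
--         m -= p
--     return total
-- ===== Notes on version B (the rewrite author's own statement) =====
-- stated objective: alternative
-- what changed: B counts the set bits of the integers up to x by repeatedly stripping the highest set bit of the exclusive upper bound m via bit_length (using S(m) = S(p) + (m-p) + S(m-p) with p the highest power of two not exceeding m, and the closed form for S(p)), instead of A's loop over bit columns from the lowest upward with its floor-division counting formula per column.
import Mathlib
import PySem

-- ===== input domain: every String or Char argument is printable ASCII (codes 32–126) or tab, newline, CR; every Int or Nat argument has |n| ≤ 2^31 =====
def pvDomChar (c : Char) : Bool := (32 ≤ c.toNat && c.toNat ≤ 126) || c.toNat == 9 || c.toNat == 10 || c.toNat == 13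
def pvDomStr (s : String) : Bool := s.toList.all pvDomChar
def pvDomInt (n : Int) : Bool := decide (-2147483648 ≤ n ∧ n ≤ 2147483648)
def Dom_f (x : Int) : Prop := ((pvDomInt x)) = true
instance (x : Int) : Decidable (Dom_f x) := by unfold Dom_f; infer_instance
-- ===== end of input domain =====

-- B counts the set bits of the integers up to x by stripping the highest set bit of the exclusive upper bound m each step, instead of A's per-bit-column division formula: a genuinely different decomposition of the same count.

-- ===== PORT A =====
-- A's while-loop over bit positions k (k only ever increments from 0, so it is a Nat here).
def fLoop (x : Int) (count : Int) (k : Nat) : Int :=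
  if h : (2:Int)^k ≤ x then
    let p_length := (2:Int)^(k+1)
    let p_count := PySem.Int.floordiv (x+1) p_length
    let count1 := count + PySem.Int.floordiv (p_count * p_length) 2
    let rest := PySem.Int.mod (x+1) p_length
    let count2 := count1 + max 0 (rest - PySem.Int.floordiv p_length 2)
    fLoop x count2 (k+1)
  else count
termination_by (x + 1 - 2^k).toNat
decreasing_by
  have h1 : (0:Int) < 2^k := pow_pos (by norm_num) k
  have h2 : (2:Int)^(k+1) = 2 * 2^k := by rw [pow_succ]; ring
  rw [h2]
  omega

def f (x : Int) : Int := fLoop x 0 0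

-- ===== PORT B =====
-- B's `while m > 1:` loop: strip the highest set bit of m each iteration.
def fAltLoop (m : Int) (total : Int) : Int :=
  if _h : 1 < m then
    let k : Nat := PySem.Int.bitLength m - 1
    let p : Int := 1 <<< k
    fAltLoop (m - p) (total + (k : Int) * (p >>> 1) + (m - p))
  else total
termination_by m.toNat
decreasing_by
  have h2 : 2 ^ (PySem.Int.bitLength m - 1) ≤ m.natAbs :=
    PySem.Int.two_pow_bitLength_le m (by omega)
  have h3 : (0:Nat) < 2 ^ (PySem.Int.bitLength m - 1) := Nat.two_pow_pos _
  simp only [Nat.one_shiftLeft]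
  omega

def f_alt (x : Int) : Int := fAltLoop (x + 1) 0

-- ===== PRECONDITION & SPEC =====
def Spec_f (x : Int) (out : Int) : Prop := out = f_alt x
instance (x : Int) (out : Int) : Decidable (Spec_f x out) := by unfold Spec_f; infer_instance

-- ===== CLAIM (what is proved, stated in full; the proofs are below) =====
def Claim_equal_f : Prop := ∀ (x : Int), Dom_f x → Spec_f x (f x)

-- ===== LEMMAS AND PROOFS =====

-- popcount of a Nat
def bc (n : Nat) : Nat :=
  if n ≠ 0 then n % 2 + bc (n / 2) else 0
termination_by n
decreasing_by omega

-- number of i < m with bit j set, as A computes it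
def cnt (j m : Nat) : Nat := m / 2^(j+1) * 2^(j+1) / 2 + (m % 2^(j+1) - 2^j)

lemma cnt_eq (j m : Nat) : cnt j m = m / (2 * 2^j) * 2^j + (m % (2 * 2^j) - 2^j) := by
  unfold cnt
  have hp : (2:Nat)^(j+1) = 2 * 2^j := by rw [pow_succ]; ring
  rw [hp]
  congr 1
  have : m / (2 * 2^j) * (2 * 2^j) = (m / (2 * 2^j) * 2^j) * 2 := by ring
  rw [this, Nat.mul_div_cancel _ (by norm_num)]

lemma cnt_zero_of_ge (j m : Nat) (h : m ≤ 2^j) : cnt j m = 0 := by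
  rw [cnt_eq]
  have hp : (0:Nat) < 2^j := Nat.two_pow_pos j
  have h1 : m / (2 * 2^j) = 0 := Nat.div_eq_of_lt (by omega)
  have h2 : m % (2 * 2^j) = m := Nat.mod_eq_of_lt (by omega)
  rw [h1, h2]
  omega

lemma cnt_succ_aux (p q r : Nat) (hp : 0 < p) (hr : r < 2*p) :
    (r + 1 + 2*p*q)/(2*p)*p + ((r + 1 + 2*p*q)%(2*p) - p) = q*p + (r - p) + r/p := by
  rw [Nat.add_mul_div_left _ _ (by omega), Nat.add_mul_mod_self_left]
  by_cases hc : r + 1 < 2*p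
  · rw [Nat.div_eq_of_lt hc, Nat.mod_eq_of_lt hc]
    by_cases h2 : p ≤ r
    · rw [Nat.div_eq_of_lt_le (by omega : 1*p ≤ r) (by omega : r < (1+1)*p)]
      simp only [Nat.zero_add]
      generalize q * p = Q
      omega
    · rw [Nat.div_eq_of_lt (by omega)]
      simp only [Nat.zero_add]
      generalize q * p = Q
      omega
  · have he : r + 1 = 2*p := by omega
    rw [he, Nat.div_self (by omega), Nat.mod_self]
    rw [Nat.div_eq_of_lt_le (by omega : 1*p ≤ r) (by omega : r < (1+1)*p)]
    have hx : (1 + q) * p = q * p + p := by ring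
    rw [hx]
    generalize q * p = Q
    omega

lemma cnt_succ (j m : Nat) : cnt j (m + 1) = cnt j m + m / 2^j % 2 := by
  rw [cnt_eq, cnt_eq]
  have hp : 0 < (2:Nat)^j := Nat.two_pow_pos j
  rw [← Nat.mod_mul_left_div_self m (2^j) 2]
  have hdm := Nat.div_add_mod m (2 * 2^j)
  have hm1 : m + 1 = m % (2 * 2^j) + 1 + 2 * 2^j * (m / (2 * 2^j)) := by omega
  rw [hm1]
  exact cnt_succ_aux (2^j) _ _ hp (Nat.mod_lt _ (by omega))

lemma bc_eq_sum_bits (K : Nat) : ∀ m, m < 2^K → bc m = ∑ j ∈ Finset.range K, m / 2^j % 2 := by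
  intro m
  induction m using Nat.strong_induction_on generalizing K with
  | _ m ih =>
    intro hm
    rw [bc]
    by_cases h : m = 0
    · simp [h]
    · simp only [h, ne_eq, not_false_eq_true, if_true]
      have hK : K ≠ 0 := by
        rintro rfl; simp at hm; omega
      obtain ⟨K', rfl⟩ : ∃ K', K = K' + 1 := ⟨K - 1, by omega⟩
      rw [Finset.sum_range_succ']
      have hdd : ∀ j, m / 2^(j+1) = m / 2 / 2^j := by
        intro j
        rw [Nat.div_div_eq_div_mul]
        congr 1
        rw [pow_succ]; ring
      have hhalf : m / 2 < 2^K' := by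
        have h2 : (2:Nat)^(K'+1) = 2 * 2^K' := by rw [pow_succ]; ring
        omega
      have := ih (m / 2) (by omega) K' hhalf
      simp only [hdd]
      rw [← this]
      simp
      omega

lemma sum_cnt_eq (K : Nat) : ∀ m, m ≤ 2^K →
    (∑ j ∈ Finset.range K, cnt j m) = ∑ i ∈ Finset.range m, bc i := by
  intro m
  induction m with
  | zero =>
    intro _
    simp
    intro j _
    exact cnt_zero_of_ge j 0 (by positivity)
  | succ m ih =>
    intro hm
    have hlt : m < 2^K := by omega
    rw [Finset.sum_range_succ, ← ih (by omega)]
    have : (∑ j ∈ Finset.range K, cnt j (m+1))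
        = ∑ j ∈ Finset.range K, (cnt j m + m / 2^j % 2) := by
      apply Finset.sum_congr rfl
      intro j _
      exact cnt_succ j m
    rw [this, Finset.sum_add_distrib, bc_eq_sum_bits K m hlt]

-- bridge: the Int arithmetic of one iteration of A equals cnt k m, for x = m - 1 ≥ 0
lemma step_eq_cnt (m k : Nat) :
    PySem.Int.floordiv (PySem.Int.floordiv (m : Int) ((2:Int)^(k+1)) * (2:Int)^(k+1)) 2
      + max 0 (PySem.Int.mod (m : Int) ((2:Int)^(k+1)) - PySem.Int.floordiv ((2:Int)^(k+1)) 2)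
    = (cnt k m : Int) := by
  have hPpos : (0:Int) < (2:Int)^(k+1) := pow_pos (by norm_num) _
  have hcastP : (Nat.cast (2^(k+1)) : Int) = (2:Int)^(k+1) := by push_cast; try ring
  rw [← hcastP]
  rw [PySem.Int.floordiv_natCast m (2^(k+1)), PySem.Int.mod_natCast m (2^(k+1))]
  have h1 : (Nat.cast (m / 2^(k+1)) : Int) * (Nat.cast (2^(k+1)) : Int)
      = (Nat.cast (m / 2^(k+1) * 2^(k+1)) : Int) := by push_cast; try ring
  rw [h1, show (2:Int) = (Nat.cast 2 : Int) from by norm_num,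
    PySem.Int.floordiv_natCast, PySem.Int.floordiv_natCast]
  have h2 : (2:Nat)^(k+1) / 2 = 2^k := by
    rw [pow_succ, Nat.mul_div_cancel _ (by norm_num)]
  rw [h2]
  have hr : m % 2^(k+1) < 2^(k+1) := Nat.mod_lt _ (by positivity)
  unfold cnt
  omega

lemma fLoop_eq (x : Int) (m : Nat) (hm : (m : Int) = x + 1) :
    ∀ d k count, x < (2:Int)^(k+d) →
      fLoop x count k = count + ((∑ j ∈ Finset.range d, cnt (k+j) m : Nat) : Int) := by
  intro d
  induction d with
  | zero =>
    intro k count hk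
    rw [fLoop]
    simp only [Nat.add_zero] at hk
    rw [dif_neg (by omega)]
    simp
  | succ d ih =>
    intro k count hk
    rw [fLoop]
    by_cases h : (2:Int)^k ≤ x
    · rw [dif_pos h]
      have hstep := step_eq_cnt m k
      rw [ih (k+1) _ (by
        have : k + 1 + d = k + (d+1) := by omega
        rw [this]; exact hk)]
      rw [Finset.sum_range_succ']
      have hre : (∑ j ∈ Finset.range d, cnt (k + (j+1)) m) = ∑ j ∈ Finset.range d, cnt (k+1+j) m := by
        apply Finset.sum_congr rfl
        intro j _
        congr 1
        omega
      rw [hre]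
      rw [← hm]
      simp only [Nat.add_zero]
      push_cast
      rw [← hstep]
      ring
    · rw [dif_neg h]
      have hzero : (∑ j ∈ Finset.range (d+1), cnt (k+j) m) = 0 := by
        apply Finset.sum_eq_zero
        intro j _
        apply cnt_zero_of_ge
        have hmono : (2:Int)^k ≤ (2:Int)^(k+j) :=
          pow_le_pow_right₀ (by norm_num) (by omega)
        have hc : (Nat.cast (2^(k+j)) : Int) = (2:Int)^(k+j) := by push_cast; try ring
        omega
      rw [hzero]
      simp

lemma bc_eq_bit (n : Nat) : bc n = n % 2 + bc (n / 2) := by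
  rw [bc]
  by_cases h : n = 0
  · subst h; rw [bc]; norm_num
  · simp [h]

lemma bc_add_pow (k : Nat) : ∀ j, j < 2^k → bc (2^k + j) = 1 + bc j := by
  induction k with
  | zero =>
    intro j hj
    interval_cases j
    rw [bc_eq_bit]
    norm_num
  | succ k ih =>
    intro j hj
    have hsplit : (2:Nat)^(k+1) = 2 * 2^k := by rw [pow_succ]; ring
    rw [bc_eq_bit, bc_eq_bit j, hsplit]
    have hmod : (2 * 2^k + j) % 2 = j % 2 := by omega
    have hdiv : (2 * 2^k + j) / 2 = 2^k + j / 2 := by omega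
    rw [hmod, hdiv, ih (j / 2) (by omega)]
    omega

lemma S_add_pow (k d : Nat) (hd : d ≤ 2^k) :
    (∑ i ∈ Finset.range (2^k + d), bc i)
      = (∑ i ∈ Finset.range (2^k), bc i) + (d + ∑ i ∈ Finset.range d, bc i) := by
  rw [Finset.sum_range_add]
  congr 1
  have : (∑ x ∈ Finset.range d, bc (2^k + x)) = ∑ x ∈ Finset.range d, (1 + bc x) := by
    apply Finset.sum_congr rfl
    intro x hx
    exact bc_add_pow k x (by
      have := Finset.mem_range.mp hx
      omega)
  rw [this, Finset.sum_add_distrib]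
  simp

lemma S_pow (k : Nat) : (∑ i ∈ Finset.range (2^k), bc i) = k * 2^(k-1) := by
  induction k with
  | zero =>
    simp only [pow_zero, Finset.sum_range_one]
    rw [bc]; norm_num
  | succ k ih =>
    have hsplit : (2:Nat)^(k+1) = 2^k + 2^k := by rw [pow_succ]; ring
    rw [hsplit, S_add_pow k (2^k) (le_refl _), ih]
    cases k with
    | zero => norm_num
    | succ k' =>
      have h1 : (2:Nat)^(k'+1) = 2^k' * 2 := by rw [pow_succ]
      simp only [Nat.add_sub_cancel]
      rw [h1]
      ring

lemma fAltLoop_eq (m : Nat) : ∀ t : Int,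
    fAltLoop (m : Int) t = t + ((∑ i ∈ Finset.range m, bc i : Nat) : Int) := by
  induction m using Nat.strong_induction_on with
  | _ m ih =>
    intro t
    rw [fAltLoop]
    by_cases h : (1:Int) < (m : Nat)
    · rw [dif_pos h]
      have hm2 : 2 ≤ m := by omega
      have hna : ((m : Int)).natAbs = m := by omega
      set bl := PySem.Int.bitLength (m : Int) with hbl
      have hlt : m < 2 ^ bl := by
        have h5 := PySem.Int.lt_two_pow_bitLength (m : Int)
        rw [← hbl] at h5
        omega
      have hle : 2 ^ (bl - 1) ≤ m := by
        have h6 := PySem.Int.two_pow_bitLength_le (m : Int) (by omega)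
        rw [← hbl] at h6
        omega
      have hbl1 : 1 ≤ bl := by
        rcases Nat.eq_zero_or_pos bl with h0 | h0
        · rw [h0] at hlt; norm_num at hlt; omega
        · omega
      have hk1 : 1 ≤ bl - 1 := by
        rcases Nat.lt_or_ge bl 2 with hb | hb
        · exfalso
          have hbl2 : bl = 1 := by omega
          rw [hbl2] at hlt
          norm_num at hlt
          omega
        · omega
      have hshl : (1 <<< (bl - 1) : Nat) = 2 ^ (bl - 1) := Nat.one_shiftLeft _
      have hshr : ((2 ^ (bl - 1) : Nat) : Int) >>> (1:Int) = ((2 ^ (bl - 1 - 1) : Nat) : Int) := by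
        rw [show (1:Int) = ((1:Nat):Int) from rfl, Int.shiftRight_natCast]
        congr 1
        rw [Nat.shiftRight_eq_div_pow]
        obtain ⟨k', hk'⟩ : ∃ k', bl - 1 = k' + 1 := ⟨bl - 1 - 1, by omega⟩
        rw [hk']
        simp [pow_succ]
      simp only [hshl, hshr]
      have hcast : (m : Int) - ((2 ^ (bl - 1) : Nat) : Int) = ((m - 2 ^ (bl - 1) : Nat) : Int) := by
        push_cast [hle]
        try ring
      rw [hcast, ih (m - 2 ^ (bl - 1)) (by
        have := Nat.two_pow_pos (bl - 1)
        omega)]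
      have hd : m - 2 ^ (bl - 1) ≤ 2 ^ (bl - 1) := by
        have hb2 : (2:Nat) ^ bl = 2 * 2 ^ (bl - 1) := by
          obtain ⟨b', hb'⟩ : ∃ b', bl = b' + 1 := ⟨bl - 1, by omega⟩
          rw [hb']
          simp [pow_succ]
          ring
        omega
      have hS : (∑ i ∈ Finset.range m, bc i)
          = (bl - 1) * 2 ^ (bl - 1 - 1) + ((m - 2 ^ (bl - 1)) + ∑ i ∈ Finset.range (m - 2 ^ (bl - 1)), bc i) := by
        have h7 := S_add_pow (bl - 1) (m - 2 ^ (bl - 1)) (by omega)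
        rw [show 2 ^ (bl - 1) + (m - 2 ^ (bl - 1)) = m from by omega] at h7
        rw [h7, S_pow]
      rw [hS]
      push_cast [hle]
      ring
    · rw [dif_neg h]
      have hm1 : m = 0 ∨ m = 1 := by omega
      have hS0 : (∑ i ∈ Finset.range m, bc i) = 0 := by
        rcases hm1 with h0 | h1
        · simp [h0]
        · rw [h1, Finset.sum_range_one, bc]; norm_num
      rw [hS0]
      simp

-- ===== VERDICT (by name: the statement is the Claim_ definition above) =====
theorem f_spec : Claim_equal_f := by
  intro x hdom
  unfold Spec_f f f_alt
  unfold Dom_f pvDomInt at hdom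
  simp only [decide_eq_true_eq] at hdom
  by_cases hx : 0 ≤ x
  · set m : Nat := (x + 1).toNat with hmdef
    have hm : (m : Int) = x + 1 := by omega
    have hK : x < (2:Int)^(0 + 33) := by norm_num; omega
    rw [fLoop_eq x m hm 33 0 0 hK]
    have hmK : m ≤ 2^33 := by
      have : (Nat.cast (2^33) : Int) = (2:Int)^33 := by push_cast; try ring
      omega
    have hsum := sum_cnt_eq 33 m hmK
    simp only [Nat.zero_add]
    rw [hsum, ← hm, fAltLoop_eq m 0]
  · rw [fLoop]
    rw [dif_neg (by simpa using by omega : ¬ (2:Int)^0 ≤ x)]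
    rw [fAltLoop]
    rw [dif_neg (by omega)]
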